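-- pv_equiv track=rewrite | github.com/kloiselperilla/AdventOfCode2018 | day2/day2.py | diff_by_one
-- ===== SOURCE A (Python) =====
-- def diff_by_one(word_a, word_b):
--     diffs = 0
--     new_word = ''
--     for a, b in zip(word_a, word_b):
--         if a != b:
--             if diffs:
--                 return None
--             diffs += 1
--         else:
--             new_word += a
--     return new_word
-- ===== SOURCE B (Python) =====
-- def diff_by_one(word_a, word_b):
--     n = min(len(word_a), len(word_b))
--     a = word_a[:n]
--     diff_indices = [i for i in range(n) if a[i] != word_b[i]]
--     if len(diff_indices) > 1:
--         return None
--     if not diff_indices: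
--         return a
--     i = diff_indices[0]
--     return a[:i] + a[i+1:]
-- ===== Notes on version B (the rewrite author's own statement) =====
-- stated objective: alternative
-- what changed: Replaces A's single accumulating pass with early exit and a diffs counter by an index-collection pass over range(n) followed by slice-based reconstruction of the common word.
import Mathlib
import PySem

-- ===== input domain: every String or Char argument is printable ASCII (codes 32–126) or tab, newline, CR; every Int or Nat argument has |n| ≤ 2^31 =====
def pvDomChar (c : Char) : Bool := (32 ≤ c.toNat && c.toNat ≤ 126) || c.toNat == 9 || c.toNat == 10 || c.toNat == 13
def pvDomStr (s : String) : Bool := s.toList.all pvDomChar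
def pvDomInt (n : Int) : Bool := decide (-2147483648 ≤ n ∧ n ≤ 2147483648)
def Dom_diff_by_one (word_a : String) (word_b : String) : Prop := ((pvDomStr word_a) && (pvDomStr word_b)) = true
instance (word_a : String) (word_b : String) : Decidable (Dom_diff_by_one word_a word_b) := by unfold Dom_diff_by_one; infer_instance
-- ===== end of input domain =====

-- B replaces A's single accumulating early-exit pass by an index-collection pass
-- followed by slice-based reconstruction (objective: alternative decomposition, same cost).

-- ===== PORT A =====
-- A's loop over zip(word_a, word_b) with the diffs counter and the growing new_word accumulator.
def pvALoop : List (Char × Char) → Nat → List Char → Option (List Char)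
  | [], _, acc => some acc
  | (a, b) :: t, diffs, acc =>
    if a ≠ b then
      if diffs ≠ 0 then none
      else pvALoop t (diffs + 1) acc
    else pvALoop t diffs (acc ++ [a])

def diff_by_one (word_a : String) (word_b : String) : Option String :=
  (pvALoop (word_a.toList.zip word_b.toList) 0 []).map String.mk

-- ===== PORT B =====
-- diff_indices = [i for i in range(n) if a[i] != word_b[i]]
def pvDiffIdx (a : List Char) (lb : List Char) (n : Nat) : List Nat :=
  (List.range n).filter (fun i => a[i]? != lb[i]?)

def diff_by_one_alt (word_a : String) (word_b : String) : Option String :=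
  let la := word_a.toList
  let lb := word_b.toList
  let n := min la.length lb.length
  let a := la.take n
  let d := pvDiffIdx a lb n
  if 1 < d.length then none
  else
    match d with
    | [] => some (String.mk a)
    | i :: _ => some (String.mk (a.take i ++ a.drop (i + 1)))

-- ===== PRECONDITION & SPEC =====
def Spec_diff_by_one (word_a : String) (word_b : String) (out : Option String) : Prop := out = diff_by_one_alt word_a word_b
instance (word_a : String) (word_b : String) (out : Option String) : Decidable (Spec_diff_by_one word_a word_b out) := by unfold Spec_diff_by_one; infer_instance

-- ===== CLAIM (what is proved, stated in full; the proofs are below) =====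
def Claim_equal_diff_by_one : Prop := ∀ (word_a : String) (word_b : String), Dom_diff_by_one word_a word_b → Spec_diff_by_one word_a word_b (diff_by_one word_a word_b)

-- ===== LEMMAS AND PROOFS =====

-- mismatching pairs / common letters of the zipped word pair
def pvMism (z : List (Char × Char)) : List (Char × Char) := z.filter (fun p => p.1 != p.2)
def pvEqs (z : List (Char × Char)) : List Char := (z.filter (fun p => p.1 == p.2)).map Prod.fst

def pvCanon (z : List (Char × Char)) : Option (List Char) :=
  if 2 ≤ (pvMism z).length then none else some (pvEqs z)

lemma pvALoop_eq (z : List (Char × Char)) : ∀ (d : Nat) (acc : List Char),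
    pvALoop z d acc =
      if 2 ≤ (if d = 0 then 0 else 1) + (pvMism z).length then none
      else some (acc ++ pvEqs z) := by
  induction z with
  | nil =>
    intro d acc
    have : ¬ 2 ≤ (if d = 0 then 0 else 1) + (pvMism ([] : List (Char × Char))).length := by
      simp [pvMism]; split <;> omega
    simp [pvALoop, this, pvEqs]
  | cons p t ih =>
    intro d acc
    obtain ⟨a, b⟩ := p
    by_cases hab : a = b
    · subst hab
      have hm : pvMism ((a, a) :: t) = pvMism t := by simp [pvMism]
      have he : pvEqs ((a, a) :: t) = a :: pvEqs t := by simp [pvEqs]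
      simp only [pvALoop, ne_eq, not_true_eq_false, if_false, hm, he]
      rw [ih]
      split <;> simp
    · have hm : pvMism ((a, b) :: t) = (a, b) :: pvMism t := by
        simp [pvMism, hab]
      have he : pvEqs ((a, b) :: t) = pvEqs t := by
        simp [pvEqs, hab]
      simp only [pvALoop, ne_eq, hab, not_false_eq_true, if_true, hm, he, List.length_cons]
      by_cases hd : d = 0
      · subst hd
        rw [if_neg (by simp), ih]
        split_ifs <;> first | rfl | (exfalso; omega)
      · rw [if_pos hd, if_pos]
        split_ifs <;> omega

lemma pvDiffIdx_cons (x y : Char) (la lb : List Char) (n : Nat) :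
    pvDiffIdx (x :: la) (y :: lb) (n + 1) =
      (if x = y then [] else [0]) ++ (pvDiffIdx la lb n).map (· + 1) := by
  simp only [pvDiffIdx, List.range_succ_eq_map, List.filter_cons, List.filter_map]
  by_cases hxy : x = y <;>
    simp [hxy, bne, Function.comp_def]

lemma pvDiffIdx_len (la : List Char) : ∀ lb : List Char,
    (pvDiffIdx (la.take (min la.length lb.length)) lb (min la.length lb.length)).length
      = (pvMism (la.zip lb)).length := by
  induction la with
  | nil => intro lb; simp [pvDiffIdx, pvMism]
  | cons x t ih =>
    intro lb
    cases lb with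
    | nil => simp [pvDiffIdx, pvMism]
    | cons y tb =>
      have hmin : min (x :: t).length (y :: tb).length = min t.length tb.length + 1 := by
        simp [Nat.succ_min_succ]
      rw [hmin, List.take_succ_cons, pvDiffIdx_cons]
      by_cases hxy : x = y <;>
        simp [hxy, pvMism, ih tb, List.zip_cons_cons] at *

-- B's body at list level equals pvCanon of the zip.
lemma pvB_eq (la : List Char) : ∀ lb : List Char,
    (let n := min la.length lb.length
     let a := la.take n
     let d := pvDiffIdx a lb n
     if 1 < d.length then none
     else
       match d with
       | [] => some a
       | i :: _ => some (a.take i ++ a.drop (i + 1))) = pvCanon (la.zip lb) := by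
  induction la with
  | nil => intro lb; simp [pvDiffIdx, pvCanon, pvMism, pvEqs]
  | cons x t ih =>
    intro lb
    cases lb with
    | nil => simp [pvDiffIdx, pvCanon, pvMism, pvEqs]
    | cons y tb =>
      have hmin : min (x :: t).length (y :: tb).length = min t.length tb.length + 1 := by
        simp [Nat.succ_min_succ]
      have hlen := pvDiffIdx_len t tb
      have ih' := ih tb
      simp only at ih'
      simp only [hmin, List.take_succ_cons, pvDiffIdx_cons]
      have hmc : pvMism ((x, y) :: t.zip tb) =
          (if x = y then [] else [(x, y)]) ++ pvMism (t.zip tb) := by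
        by_cases hxy : x = y <;> simp [hxy, pvMism]
      have hec : pvEqs ((x, y) :: t.zip tb) =
          (if x = y then [x] else []) ++ pvEqs (t.zip tb) := by
        by_cases hxy : x = y <;> simp [hxy, pvEqs]
      cases hd : pvDiffIdx (t.take (min t.length tb.length)) tb (min t.length tb.length) with
      | nil =>
        rw [hd] at ih' hlen
        have h0 : (pvMism (t.zip tb)).length = 0 := by simpa using hlen.symm
        have h2 : ¬ 2 ≤ (pvMism (t.zip tb)).length := by omega
        have heq : pvEqs (t.zip tb) = t.take (min t.length tb.length) := by
          simp only [pvCanon, if_neg h2] at ih'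
          simpa using ih'.symm
        by_cases hxy : x = y
        · subst hxy
          simp [pvCanon, List.zip_cons_cons, hmc, hec, h2, heq, h0]
        · simp [hxy, pvCanon, List.zip_cons_cons, hmc, hec, heq, h0]
      | cons i rest =>
        rw [hd] at ih' hlen
        have hadd : (pvMism (t.zip tb)).length = rest.length + 1 := by simpa using hlen.symm
        by_cases hxy : x = y
        · subst hxy
          cases rest with
          | nil =>
            have h2 : ¬ 2 ≤ (pvMism (t.zip tb)).length := by
              simp only [List.length_nil] at hadd; omega
            have heq : pvEqs (t.zip tb) =
                (t.take (min t.length tb.length)).take i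
                  ++ (t.take (min t.length tb.length)).drop (i + 1) := by
              simp only [pvCanon, if_neg h2] at ih'
              simpa using ih'.symm
            simp [pvCanon, List.zip_cons_cons, hmc, hec, h2, heq]
          | cons j rest' =>
            have h2 : 2 ≤ (pvMism (t.zip tb)).length := by
              simp only [List.length_cons] at hadd; omega
            simp [pvCanon, List.zip_cons_cons, hmc, hec, h2]
        · have h2 : 2 ≤ (pvMism ((x, y) :: t.zip tb)).length := by
            rw [hmc, if_neg hxy]
            simp
            omega
          simp [hxy, pvCanon, List.zip_cons_cons, h2]

-- ===== VERDICT (by name: the statement is the Claim_ definition above) =====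
theorem diff_by_one_spec : Claim_equal_diff_by_one := by
  intro wa wb _
  unfold Spec_diff_by_one diff_by_one diff_by_one_alt
  rw [pvALoop_eq]
  have hb := pvB_eq wa.toList wb.toList
  simp only at hb
  cases hd : pvDiffIdx ((wa.toList).take (min wa.toList.length wb.toList.length)) wb.toList
      (min wa.toList.length wb.toList.length) with
  | nil =>
    rw [hd] at hb
    simp only [pvCanon] at hb
    simp at hb ⊢
    split_ifs at hb ⊢ <;> simp_all <;> omega
  | cons i rest =>
    rw [hd] at hb
    simp only [pvCanon] at hb
    simp at hb ⊢
    split_ifs at hb ⊢ <;> simp_all
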